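-- pv_equiv track=rewrite | github.com/Joao-Helio/AAED | Aula7/AlienRibonucleicAcid.py | contar_conexoes
-- ===== SOURCE A (Python) =====
-- def contar_conexoes(sequencia):
--     contador_B_S = 0
--     contador_C_F = 0
--     conexoes = 0
--
--     for char in sequencia:
--         if char == 'B':
--             contador_B_S += 1
--         elif char == 'S':
--             if contador_B_S > 0:
--                 contador_B_S -= 1
--                 conexoes += 1
--         elif char == 'C':
--             contador_C_F += 1
--         elif char == 'F':
--             if contador_C_F > 0:
--                 contador_C_F -= 1
--                 conexoes += 1
--
--     return conexoes
-- ===== SOURCE B (Python) =====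
-- def count_pairs(open_c, close_c, sequencia):
--     aberto = 0
--     conexoes = 0
--     for char in sequencia:
--         if char == open_c:
--             aberto += 1
--         elif char == close_c:
--             if aberto > 0:
--                 aberto -= 1
--                 conexoes += 1
--     return conexoes
--
-- def contar_conexoes(sequencia):
--     return count_pairs('B', 'S', sequencia) + count_pairs('C', 'F', sequencia)
-- ===== Notes on version B (the rewrite author's own statement) =====
-- stated objective: alternative
-- what changed: A's single interleaved pass with two counters and one shared connection count is split into two independent passes, each matching one symbol pair (B-S, C-F) with its own counter, summed at the end; valid because the two matchings never interact.
import Mathlib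
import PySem

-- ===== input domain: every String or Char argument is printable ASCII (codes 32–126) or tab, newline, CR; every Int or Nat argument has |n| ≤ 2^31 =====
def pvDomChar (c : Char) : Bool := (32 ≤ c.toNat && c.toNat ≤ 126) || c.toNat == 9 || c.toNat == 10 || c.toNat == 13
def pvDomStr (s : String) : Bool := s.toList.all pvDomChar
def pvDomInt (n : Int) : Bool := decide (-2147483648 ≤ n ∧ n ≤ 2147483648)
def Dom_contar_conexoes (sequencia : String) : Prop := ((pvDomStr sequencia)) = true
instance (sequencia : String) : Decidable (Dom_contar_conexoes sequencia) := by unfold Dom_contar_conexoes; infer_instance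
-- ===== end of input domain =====

-- B replaces A's single interleaved pass with two independent one-pair passes (B-S and C-F) summed; objective: alternative decomposition.

-- ===== PORT A =====
-- state: (contador_B_S, contador_C_F, conexoes)
def aStep (st : Int × Int × Int) (ch : Char) : Int × Int × Int :=
  if ch = 'B' then (st.1 + 1, st.2.1, st.2.2)
  else if ch = 'S' then (if st.1 > 0 then (st.1 - 1, st.2.1, st.2.2 + 1) else st)
  else if ch = 'C' then (st.1, st.2.1 + 1, st.2.2)
  else if ch = 'F' then (if st.2.1 > 0 then (st.1, st.2.1 - 1, st.2.2 + 1) else st)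
  else st

def contar_conexoes (sequencia : String) : Int :=
  (sequencia.toList.foldl aStep (0, 0, 0)).2.2

-- ===== PORT B =====
-- state: (aberto, conexoes)
def bStep (open_c close_c : Char) (st : Int × Int) (ch : Char) : Int × Int :=
  if ch = open_c then (st.1 + 1, st.2)
  else if ch = close_c then (if st.1 > 0 then (st.1 - 1, st.2 + 1) else st)
  else st

def count_pairs (open_c close_c : Char) (sequencia : String) : Int :=
  (sequencia.toList.foldl (bStep open_c close_c) (0, 0)).2

def contar_conexoes_alt (sequencia : String) : Int :=
  count_pairs 'B' 'S' sequencia + count_pairs 'C' 'F' sequencia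

-- ===== PRECONDITION & SPEC =====
def Spec_contar_conexoes (sequencia : String) (out : Int) : Prop := out = contar_conexoes_alt sequencia
instance (sequencia : String) (out : Int) : Decidable (Spec_contar_conexoes sequencia out) := by unfold Spec_contar_conexoes; infer_instance

-- ===== CLAIM (what is proved, stated in full; the proofs are below) =====
def Claim_equal_contar_conexoes : Prop := ∀ (sequencia : String), Dom_contar_conexoes sequencia → Spec_contar_conexoes sequencia (contar_conexoes sequencia)

-- ===== LEMMAS AND PROOFS =====

-- a one-pair fold started at (x, y) is the fold started at (x, 0) with y added to the count
theorem bfold_offset (o c : Char) (l : List Char) (x y : Int) :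
    l.foldl (bStep o c) (x, y) =
      ((l.foldl (bStep o c) (x, 0)).1, y + (l.foldl (bStep o c) (x, 0)).2) := by
  induction l generalizing x y with
  | nil => simp
  | cons ch t ih =>
    simp only [List.foldl_cons, bStep]
    by_cases h1 : ch = o
    · simp only [if_pos h1]
      exact ih (x + 1) y
    · simp only [if_neg h1]
      by_cases h2 : ch = c
      · simp only [if_pos h2]
        by_cases h3 : (x : Int) > 0
        · simp only [if_pos h3, zero_add]
          rw [ih (x - 1) (y + 1), ih (x - 1) 1]
          exact Prod.ext rfl (by dsimp only; omega)
        · simp only [if_neg h3]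
          exact ih x y
      · simp only [if_neg h2]
        exact ih x y

-- A's fold decomposes into the two independent one-pair folds
theorem afold_split (l : List Char) (b c k : Int) :
    l.foldl aStep (b, c, k) =
      ((l.foldl (bStep 'B' 'S') (b, 0)).1,
       (l.foldl (bStep 'C' 'F') (c, 0)).1,
       k + (l.foldl (bStep 'B' 'S') (b, 0)).2 + (l.foldl (bStep 'C' 'F') (c, 0)).2) := by
  induction l generalizing b c k with
  | nil => simp
  | cons ch t ih =>
    simp only [List.foldl_cons]
    by_cases hB : ch = 'B'
    · subst hB
      simp only [aStep, bStep, reduceIte]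
      exact ih (b + 1) c k
    by_cases hS : ch = 'S'
    · subst hS
      simp only [aStep, bStep, reduceIte, if_neg hB, if_neg (by decide : ¬('S' : Char) = 'C'), if_neg (by decide : ¬('S' : Char) = 'F')]
      by_cases hb : b > 0
      · simp only [if_pos hb, zero_add]
        rw [ih (b - 1) c (k + 1), bfold_offset 'B' 'S' t (b - 1) 1]
        refine Prod.ext rfl (Prod.ext rfl ?_); dsimp only; omega
      · simp only [if_neg hb]
        exact ih b c k
    by_cases hC : ch = 'C'
    · subst hC
      simp only [aStep, bStep, reduceIte]
      exact ih b (c + 1) k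
    by_cases hF : ch = 'F'
    · subst hF
      simp only [aStep, bStep, reduceIte, if_neg hB, if_neg hS, if_neg (by decide : ¬('F' : Char) = 'C')]
      by_cases hc : c > 0
      · simp only [if_pos hc, zero_add]
        rw [ih b (c - 1) (k + 1), bfold_offset 'C' 'F' t (c - 1) 1]
        refine Prod.ext rfl (Prod.ext rfl ?_); dsimp only; omega
      · simp only [if_neg hc]
        exact ih b c k
    · simp only [aStep, bStep, if_neg hB, if_neg hS, if_neg hC, if_neg hF]
      exact ih b c k

-- ===== VERDICT (by name: the statement is the Claim_ definition above) =====
theorem contar_conexoes_spec : Claim_equal_contar_conexoes := by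
  intro s _
  unfold Spec_contar_conexoes contar_conexoes contar_conexoes_alt count_pairs
  rw [afold_split]
  ring
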